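-- pv_equiv track=rewrite | github.com/tobiasperel/IntroALaProgramacion | simulacros/simulacro.py | contar_traducciones_iguales
-- ===== SOURCE A (Python) =====
-- def contar_traducciones_iguales(ing:dict, ale: dict) -> int:
--     cantidad:int = 0
--     dictAdevolver = ing.copy()
--     aleKeys = list(ale.keys())
--     aleClave= list(ale.values())
--     for i in range(len(aleKeys)):
--         if aleKeys[i] in dictAdevolver.keys():
--             if dictAdevolver[aleKeys[i]] == aleClave[i]:
--                 cantidad +=1
--     return cantidad
-- ===== SOURCE B (Python) =====
-- def contar_traducciones_iguales(ing: dict, ale: dict) -> int: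
--     # A (key, value) pair is counted iff it appears in both dicts; since dict
--     # items are unique per key, the set intersection of the item pairs is
--     # exactly the set of keys translated identically.
--     return len(set(ing.items()) & set(ale.items()))
-- ===== Notes on version B (the rewrite author's own statement) =====
-- stated objective: idiomatic
-- what changed: A loops over parallel key/value lists of ale with a membership test and a dict lookup per index; B performs no lookups or loop at all: it intersects the two dicts' item-pair sets and returns the intersection's size.
import Mathlib
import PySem

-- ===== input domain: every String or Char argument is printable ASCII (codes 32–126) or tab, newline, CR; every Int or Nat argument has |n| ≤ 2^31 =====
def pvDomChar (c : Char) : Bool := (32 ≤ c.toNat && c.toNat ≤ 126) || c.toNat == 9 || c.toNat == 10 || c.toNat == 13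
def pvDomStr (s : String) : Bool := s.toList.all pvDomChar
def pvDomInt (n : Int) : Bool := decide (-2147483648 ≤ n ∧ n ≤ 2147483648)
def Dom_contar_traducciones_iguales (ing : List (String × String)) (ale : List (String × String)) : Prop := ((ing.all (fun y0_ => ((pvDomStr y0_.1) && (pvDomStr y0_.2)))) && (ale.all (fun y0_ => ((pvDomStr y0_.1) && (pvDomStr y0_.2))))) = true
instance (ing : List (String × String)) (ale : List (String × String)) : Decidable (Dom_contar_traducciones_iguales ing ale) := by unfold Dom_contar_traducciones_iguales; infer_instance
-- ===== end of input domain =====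

-- B replaces A's index loop with per-key lookups by a single set intersection of the two dicts' (key, value) item pairs (idiomatic rewrite, same cost).
-- ===== PORT A =====
def contar_traducciones_iguales (ing : List (String × String)) (ale : List (String × String)) : Int :=
  let dictAdevolver := PySem.Dict.ofList ing
  let aleD := PySem.Dict.ofList ale
  let aleKeys := aleD.keys
  let aleClave := aleD.values
  (PySem.List.pyRange 0 aleKeys.length 1).foldl (fun cantidad i =>
    if dictAdevolver.keys.contains (PySem.List.pyGetD aleKeys i "") then
      if dictAdevolver.get? (PySem.List.pyGetD aleKeys i "") == some (PySem.List.pyGetD aleClave i "") then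
        cantidad + 1
      else cantidad
    else cantidad) 0

-- ===== PORT B =====
def contar_traducciones_iguales_alt (ing : List (String × String)) (ale : List (String × String)) : Int :=
  let ingD := PySem.Dict.ofList ing
  let aleD := PySem.Dict.ofList ale
  ((PySem.Set.inter (PySem.Set.ofList ingD.items) (PySem.Set.ofList aleD.items)).length : Int)

-- ===== PRECONDITION & SPEC =====
def Spec_contar_traducciones_iguales (ing : List (String × String)) (ale : List (String × String)) (out : Int) : Prop := out = contar_traducciones_iguales_alt ing ale
instance (ing : List (String × String)) (ale : List (String × String)) (out : Int) : Decidable (Spec_contar_traducciones_iguales ing ale out) := by unfold Spec_contar_traducciones_iguales; infer_instance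

-- ===== CLAIM (what is proved, stated in full; the proofs are below) =====
def Claim_equal_contar_traducciones_iguales : Prop := ∀ (ing : List (String × String)) (ale : List (String × String)), Dom_contar_traducciones_iguales ing ale → Spec_contar_traducciones_iguales ing ale (contar_traducciones_iguales ing ale)

-- ===== LEMMAS AND PROOFS =====

-- A's index loop over ale's parallel key/value lists counts the items satisfying its test.
lemma loopA_eq_countP (dI dA : PySem.Dict String String) :
    (PySem.List.pyRange 0 dA.keys.length 1).foldl (fun cantidad i =>
      if dI.keys.contains (PySem.List.pyGetD dA.keys i "") then
        if dI.get? (PySem.List.pyGetD dA.keys i "") == some (PySem.List.pyGetD dA.values i "") then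
          cantidad + 1
        else cantidad
      else cantidad) 0
    = (dA.items.countP (fun kv => dI.keys.contains kv.1 && (dI.get? kv.1 == some kv.2)) : Int) := by
  have hk : dA.keys = dA.items.map Prod.fst := by simp [PySem.Dict.keys]
  have hv : dA.values = dA.items.map Prod.snd := by simp [PySem.Dict.values]
  have hlen : ((dA.keys.length : Int)) = ((dA.items.length : Int)) := by simp [hk]
  rw [hlen]
  rw [PySem.List.foldl_congr_mem _ _
      (fun c j => (fun (c : Int) (kv : String × String) =>
        if dI.keys.contains kv.1 then
          if dI.get? kv.1 == some kv.2 then c + 1 else c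
        else c) c (PySem.List.pyGetD dA.items j ("", ""))) 0 ?_]
  · rw [PySem.List.foldl_pyRange_zero_pyGetD' dA.items ("", "")
        (fun (c : Int) (kv : String × String) =>
          if dI.keys.contains kv.1 then
            if dI.get? kv.1 == some kv.2 then c + 1 else c
          else c) 0]
    rw [PySem.List.foldl_congr_mem _ _
        (fun (c : Int) (kv : String × String) =>
          if (dI.keys.contains kv.1 && (dI.get? kv.1 == some kv.2)) then c + 1 else c) 0 ?_]
    · rw [PySem.List.foldl_if_add_one]
      simp
    · intro c kv _
      by_cases h1 : kv.1 ∈ dI.keys <;> by_cases h2 : dI.get? kv.1 = some kv.2 <;>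
        simp [h1, h2]
  · intro c j hj
    simp only []
    rw [PySem.List.mem_pyRange_one] at hj
    have hj' : j < (dA.items.length : Int) := hj.2
    rw [PySem.List.pyGetD_eq_getElem _ _ hj.1 (by rw [hk]; simpa using hj'),
        PySem.List.pyGetD_eq_getElem _ _ hj.1 (by rw [hv]; simpa using hj'),
        PySem.List.pyGetD_eq_getElem _ _ hj.1 hj']
    simp [hk, hv]

-- A's count over ale's items equals the size of the intersection of the two item sets.
lemma countP_items_eq_inter_length (dI dA : PySem.Dict String String)
    (hI : dI.keys.Nodup) (hA : dA.keys.Nodup) :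
    dA.items.countP (fun kv => dI.keys.contains kv.1 && (dI.get? kv.1 == some kv.2))
    = (PySem.Set.inter (PySem.Set.ofList dI.items) (PySem.Set.ofList dA.items)).length := by
  have hInd : dI.items.Nodup := hI.of_map Prod.fst
  have hAnd : dA.items.Nodup := hA.of_map Prod.fst
  rw [List.countP_eq_length_filter]
  apply List.Perm.length_eq
  rw [List.perm_ext_iff_of_nodup (hAnd.filter _)
      (PySem.Set.nodup_inter _ _ (PySem.Set.nodup_ofList dI.items))]
  intro kv
  simp only [List.mem_filter, PySem.Set.mem_inter, PySem.Set.mem_ofList, Bool.and_eq_true,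
    List.contains_iff_mem, beq_iff_eq]
  constructor
  · rintro ⟨hmem, _, heq⟩
    exact ⟨PySem.Dict.mem_items_of_get?_eq_some dI heq, hmem⟩
  · rintro ⟨hinI, hinA⟩
    have heq : dI.get? kv.1 = some kv.2 := by
      obtain ⟨k, v⟩ := kv
      exact PySem.Dict.get?_of_mem_items dI hinI hI
    exact ⟨hinA, PySem.Dict.mem_keys_of_mem_items dI hinI, heq⟩

-- ===== VERDICT (by name: the statement is the Claim_ definition above) =====
theorem contar_traducciones_iguales_spec : Claim_equal_contar_traducciones_iguales := by
  intro ing ale _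
  unfold Spec_contar_traducciones_iguales contar_traducciones_iguales contar_traducciones_iguales_alt
  rw [loopA_eq_countP, countP_items_eq_inter_length _ _
    (PySem.Dict.nodup_keys_ofList ing) (PySem.Dict.nodup_keys_ofList ale)]
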